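-- pv_equiv track=rewrite | github.com/hexu1985/Protobuf.Tutorial | data_type_and_encoding/base_128_varint/base_128_varint_encode.py | base_128_varint_encode
-- ===== SOURCE A (Python) =====
-- def intToBin32(i):
--     return bin(((1 << 32) - 1) & i)[2:]
--
-- def base_128_varint_encode(istr):
--     bits=intToBin32(int(istr))
--     bits_list=[]
--     while len(bits) > 7:
--         bits_list.append('1'+bits[-7:])
--         bits=bits[:-7]
--     bits_list.append((8-len(bits))*'0'+bits)
--     bits_list.reverse()
--     return bits_list    # big endian
-- ===== SOURCE B (Python) =====
-- def base_128_varint_encode(istr):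
--     value = int(istr) & ((1 << 32) - 1)
--     ngroups = (max(value.bit_length(), 1) + 6) // 7
--     out = []
--     for k in range(ngroups - 1, -1, -1):
--         chunk = (value >> (7 * k)) & 0x7F
--         out.append(format(chunk if k == ngroups - 1 else 0x80 | chunk, '08b'))
--     return out
-- ===== Notes on version B (the rewrite author's own statement) =====
-- stated objective: alternative
-- what changed: B computes the number of 7-bit groups in closed form from bit_length and emits each 8-bit string directly in big-endian order by arithmetic shifts/masks, instead of A's repeated string slicing of a binary string plus a final reverse.
import Mathlib
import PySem

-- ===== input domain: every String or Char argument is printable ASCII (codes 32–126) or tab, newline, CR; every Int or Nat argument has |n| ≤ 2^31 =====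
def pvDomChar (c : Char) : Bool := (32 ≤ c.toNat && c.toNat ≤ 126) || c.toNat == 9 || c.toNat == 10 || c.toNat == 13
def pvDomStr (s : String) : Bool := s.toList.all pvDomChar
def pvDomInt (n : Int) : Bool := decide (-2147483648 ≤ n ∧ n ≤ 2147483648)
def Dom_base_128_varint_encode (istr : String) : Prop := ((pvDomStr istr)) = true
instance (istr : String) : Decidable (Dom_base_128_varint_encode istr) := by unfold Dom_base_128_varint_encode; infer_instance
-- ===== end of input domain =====

-- B replaces A's repeated string slicing (and final reverse) by a closed-form group
-- count from bit_length and direct big-endian emission via shifts/masks ("alternative").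

-- ===== PORT A =====
-- bin(n)[2:] digits, msb first; empty for 0 (helper used by both binDigits and fmt8)
def binCore (n : Nat) : List Char :=
  if n = 0 then [] else binCore (n / 2) ++ [if n % 2 = 1 then '1' else '0']

-- bin(n)[2:] : '0' for 0
def binDigits (n : Nat) : List Char := if n = 0 then ['0'] else binCore n

-- intToBin32: ((1 << 32) - 1) & i = i mod 2^32 (exact: the mask keeps the low 32 bits
-- of i's two's complement, which is Python i % 2**32)
def intToBin32 (i : Int) : String := String.mk (binDigits ((PySem.Int.mod i (2 ^ 32)).toNat))

-- the while loop: bits[-7:] = drop (len-7), bits[:-7] = take (len-7) (exact for len > 7)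
def loopA (bits : List Char) (acc : List String) : List String :=
  if h : 7 < bits.length then
    loopA (bits.take (bits.length - 7)) (acc ++ [String.mk ('1' :: bits.drop (bits.length - 7))])
  else
    acc ++ [String.mk (List.replicate (8 - bits.length) '0' ++ bits)]
termination_by bits.length
decreasing_by simp; omega

def base_128_varint_encode (istr : String) : List String :=
  match PySem.Int.ofStr? istr with
  | none => []   -- int(istr) raises ValueError; excluded by Pre_
  | some i => (loopA (intToBin32 i).toList []).reverse

-- ===== PORT B =====
-- value.bit_length()
def pyBitLength (n : Nat) : Nat :=
  if n = 0 then 0 else pyBitLength (n / 2) + 1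

-- format(x, '08b'): binary digits of x left-padded with '0' to width 8 (exact for all x ≥ 0)
def fmt8 (x : Nat) : String :=
  String.mk (List.replicate (8 - (binCore x).length) '0' ++ binCore x)

def base_128_varint_encode_alt (istr : String) : List String :=
  match PySem.Int.ofStr? istr with
  | none => []   -- int(istr) raises ValueError; excluded by Pre_
  | some i =>
    let value := (PySem.Int.mod i (2 ^ 32)).toNat   -- int(istr) & ((1 << 32) - 1)
    let ngroups := (max (pyBitLength value) 1 + 6) / 7
    -- for k in range(ngroups - 1, -1, -1): descending k = ngroups-1 … 0
    (List.range ngroups).reverse.map (fun k =>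
      let chunk := value / 2 ^ (7 * k) % 128   -- (value >> (7*k)) & 0x7F
      fmt8 (if k = ngroups - 1 then chunk else 128 ||| chunk))

-- ===== PRECONDITION & SPEC =====
-- Pre_ excludes exactly the strings on which int(istr) raises ValueError.
def Pre_base_128_varint_encode (istr : String) : Prop := (PySem.Int.ofStr? istr).isSome = true
instance (istr : String) : Decidable (Pre_base_128_varint_encode istr) := by unfold Pre_base_128_varint_encode; infer_instance
def pvWitness_base_128_varint_encode : String := "300"

def Spec_base_128_varint_encode (istr : String) (out : List String) : Prop := out = base_128_varint_encode_alt istr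
instance (istr : String) (out : List String) : Decidable (Spec_base_128_varint_encode istr out) := by unfold Spec_base_128_varint_encode; infer_instance

-- ===== CLAIM (what is proved, stated in full; the proofs are below) =====
def Claim_equal_base_128_varint_encode : Prop := ∀ (istr : String), Dom_base_128_varint_encode istr → Pre_base_128_varint_encode istr → Spec_base_128_varint_encode istr (base_128_varint_encode istr)

-- ===== LEMMAS AND PROOFS =====

-- fixed-width binary digits, msb first
def binFixed (w n : Nat) : List Char :=
  match w with
  | 0 => []
  | w + 1 => binFixed w (n / 2) ++ [if n % 2 = 1 then '1' else '0']

theorem binFixed_length (w n : Nat) : (binFixed w n).length = w := by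
  induction w generalizing n with
  | zero => rfl
  | succ w ih => simp [binFixed, ih]

theorem binFixed_zero (w : Nat) : binFixed w 0 = List.replicate w '0' := by
  induction w with
  | zero => rfl
  | succ w ih => simp [binFixed, ih, List.replicate_succ']

theorem binFixed_add (a b n : Nat) :
    binFixed (a + b) n = binFixed a (n / 2 ^ b) ++ binFixed b (n % 2 ^ b) := by
  induction b generalizing n with
  | zero => simp [binFixed]
  | succ b ih =>
    show binFixed (a + b + 1) n = _
    rw [binFixed, ih]
    have h1 : n / 2 / 2 ^ b = n / 2 ^ (b + 1) := by
      rw [Nat.div_div_eq_div_mul, pow_succ']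
    have h2 : n / 2 % 2 ^ b = n % 2 ^ (b + 1) / 2 := by
      rw [pow_succ', Nat.mod_mul_right_div_self]
    have h3 : n % 2 = n % 2 ^ (b + 1) % 2 := by
      rw [Nat.mod_mod_of_dvd _ (dvd_pow_self 2 (Nat.succ_ne_zero b))]
    rw [h1, h2, h3, List.append_assoc]
    congr 1

theorem binCore_eq_binFixed (n : Nat) : binCore n = binFixed (binCore n).length n := by
  induction n using Nat.strong_induction_on with
  | _ n ih =>
    by_cases h : n = 0
    · simp [h, binCore, binFixed]
    · have ihh := ih (n / 2) (Nat.div_lt_self (Nat.pos_of_ne_zero h) one_lt_two)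
      have hlen : (binCore n).length = (binCore (n / 2)).length + 1 := by
        conv_lhs => rw [binCore]
        simp [h]
      conv_lhs => rw [binCore]
      simp only [h, if_false]
      conv_lhs => rw [ihh]
      rw [hlen]
      rfl

theorem binCore_len_le (w n : Nat) : (binCore n).length ≤ w ↔ n < 2 ^ w := by
  induction w generalizing n with
  | zero =>
    constructor
    · intro h
      by_contra hn
      have hn' : n ≠ 0 := by omega
      rw [binCore] at h; simp [hn'] at h
    · intro h
      have : n = 0 := by omega
      simp [this, binCore]
  | succ w ih =>
    by_cases h : n = 0
    · simp [h, binCore]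
    · rw [binCore]
      simp only [h, if_false, List.length_append, List.length_cons, List.length_nil]
      have h3 : n / 2 < 2 ^ w ↔ n < 2 ^ (w + 1) := by
        rw [Nat.div_lt_iff_lt_mul (by norm_num), pow_succ]
      have h4 := ih (n / 2)
      omega

theorem pad_eq_binFixed (w n : Nat) (h : n < 2 ^ w) :
    List.replicate (w - (binCore n).length) '0' ++ binCore n = binFixed w n := by
  set L := (binCore n).length with hL
  have hLw : L ≤ w := (binCore_len_le w n).mpr h
  have hnL : n < 2 ^ L := (binCore_len_le L n).mp le_rfl
  have : binFixed w n = binFixed ((w - L) + L) n := by rw [Nat.sub_add_cancel hLw]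
  rw [this, binFixed_add]
  rw [Nat.div_eq_of_lt hnL, Nat.mod_eq_of_lt hnL, binFixed_zero, ← binCore_eq_binFixed]

theorem pyBitLength_eq (n : Nat) : pyBitLength n = (binCore n).length := by
  induction n using Nat.strong_induction_on with
  | _ n ih =>
    by_cases h : n = 0
    · simp [h, pyBitLength, binCore]
    · rw [pyBitLength, binCore]
      simp only [h, if_false, List.length_append, List.length_cons, List.length_nil]
      rw [ih (n / 2) (Nat.div_lt_self (Nat.pos_of_ne_zero h) one_lt_two)]

theorem lor_128 : ∀ c : Nat, c < 128 → 128 ||| c = 128 + c := by decide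

theorem binDigits_eq (v : Nat) :
    binDigits v = binFixed (max (pyBitLength v) 1) v := by
  by_cases h : v = 0
  · simp [h, binDigits, pyBitLength, binFixed]
  · have h1 : 1 ≤ (binCore v).length := by
      by_contra hc
      have : (binCore v).length ≤ 0 := by omega
      have := (binCore_len_le 0 v).mp this
      omega
    rw [binDigits, pyBitLength_eq]
    simp only [h, if_false, Nat.max_eq_left h1]
    exact binCore_eq_binFixed v

theorem v_lt_pow (v : Nat) : v < 2 ^ (max (pyBitLength v) 1) := by
  rw [pyBitLength_eq]
  exact (binCore_len_le _ v).mp (le_max_left _ _)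

-- the main loop invariant: A's loop on the W-bit string of v produces, low-to-high,
-- exactly B's chunk strings for k = 0 … ngroups-1
theorem loopA_eq (W : Nat) (v : Nat) (acc : List String)
    (h1 : 1 ≤ W) (h2 : v < 2 ^ W) :
    loopA (binFixed W v) acc =
      acc ++ (List.range ((W + 6) / 7)).map (fun k =>
        fmt8 (if k = (W + 6) / 7 - 1 then v / 2 ^ (7 * k) % 128
              else 128 ||| (v / 2 ^ (7 * k) % 128))) := by
  by_cases hW : W ≤ 7
  · have hng : (W + 6) / 7 = 1 := by omega
    rw [loopA]
    simp only [binFixed_length]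
    have h7 : ¬ (7 < W) := by omega
    rw [dif_neg h7]
    have hv128 : v < 128 := lt_of_lt_of_le h2 (Nat.pow_le_pow_right (by norm_num) hW)
    have hv256 : v < 2 ^ 8 := by omega
    have key : List.replicate (8 - W) '0' ++ binFixed W v = binFixed 8 v := by
      have : binFixed 8 v = binFixed ((8 - W) + W) v := by
        congr 1; omega
      rw [this, binFixed_add, Nat.div_eq_of_lt h2, Nat.mod_eq_of_lt h2, binFixed_zero]
    have key2 : fmt8 v = String.mk (binFixed 8 v) := by
      rw [fmt8, pad_eq_binFixed 8 v hv256]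
    rw [key, hng]
    simp [List.range_succ, key2, Nat.mod_eq_of_lt hv128]
  · -- W > 7 : one loop step then induction
    have h7 : 7 < W := by omega
    have hng : (W + 6) / 7 = ((W - 7) + 6) / 7 + 1 := by omega
    rw [loopA]
    simp only [binFixed_length]
    rw [dif_pos h7]
    have hsplit : binFixed W v = binFixed (W - 7) (v / 2 ^ 7) ++ binFixed 7 (v % 2 ^ 7) := by
      conv_lhs => rw [show W = (W - 7) + 7 by omega]
      exact binFixed_add _ _ _
    have hlen : (binFixed (W - 7) (v / 2 ^ 7)).length = W - 7 := binFixed_length _ _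
    have htake : (binFixed W v).take (W - 7) = binFixed (W - 7) (v / 2 ^ 7) := by
      rw [hsplit]; exact List.take_left' hlen
    have hdrop : (binFixed W v).drop (W - 7) = binFixed 7 (v % 2 ^ 7) := by
      rw [hsplit]; exact List.drop_left' hlen
    have hstep : ('1' :: binFixed 7 (v % 2 ^ 7)) = binFixed 8 (128 + v % 2 ^ 7) := by
      have h8 : binFixed 8 (128 + v % 2 ^ 7) =
          binFixed 1 ((128 + v % 2 ^ 7) / 2 ^ 7) ++ binFixed 7 ((128 + v % 2 ^ 7) % 2 ^ 7) := by
        exact binFixed_add 1 7 _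
      have hm : v % 2 ^ 7 < 2 ^ 7 := Nat.mod_lt _ (by norm_num)
      have hd : (128 + v % 2 ^ 7) / 2 ^ 7 = 1 := by omega
      have hm2 : (128 + v % 2 ^ 7) % 2 ^ 7 = v % 2 ^ 7 := by omega
      rw [h8, hd, hm2]
      rfl
    rw [htake, hdrop]
    have hW' : 1 ≤ W - 7 := by omega
    have hv' : v / 2 ^ 7 < 2 ^ (W - 7) := by
      rw [Nat.div_lt_iff_lt_mul (by norm_num : 0 < 2 ^ 7), ← pow_add]
      have : W - 7 + 7 = W := by omega
      rw [this]; exact h2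
    rw [loopA_eq (W - 7) (v / 2 ^ 7) _ hW' hv']
    rw [hng, List.append_assoc, List.range_succ_eq_map]
    congr 1
    simp only [List.map_cons, List.map_map, List.singleton_append]
    have hng1 : ((W - 7) + 6) / 7 + 1 - 1 ≠ 0 := by omega
    congr 1
    · -- head: k = 0 of the larger range
      have : (0 : Nat) ≠ ((W - 7) + 6) / 7 + 1 - 1 := by omega
      simp only [this, if_false]
      have hm : v / 2 ^ (7 * 0) % 128 = v % 2 ^ 7 := by norm_num
      have hmlt : v % 2 ^ 7 < 128 := by
        have := Nat.mod_lt v (show 0 < 2 ^ 7 by norm_num)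
        omega
      rw [hm, lor_128 _ hmlt, fmt8]
      have hx : 128 + v % 2 ^ 7 < 2 ^ 8 := by omega
      rw [pad_eq_binFixed 8 _ hx, ← hstep]
    · -- tail: shift k by one
      apply List.map_congr_left
      intro k hk
      simp only [Function.comp]
      have hchunk : v / 2 ^ 7 / 2 ^ (7 * k) % 128 = v / 2 ^ (7 * (k + 1)) % 128 := by
        rw [Nat.div_div_eq_div_mul, ← pow_add]
        congr 2
        ring
      have hcond : (k = ((W - 7) + 6) / 7 - 1) ↔ (k + 1 = ((W - 7) + 6) / 7 + 1 - 1) := by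
        rw [List.mem_range] at hk
        omega
      rw [hchunk]
      by_cases hkc : k = ((W - 7) + 6) / 7 - 1
      · rw [if_pos hkc, if_pos (hcond.mp hkc)]
      · rw [if_neg hkc, if_neg (fun h => hkc (hcond.mpr h))]
termination_by W
decreasing_by omega

-- ===== VERDICT (by name: the statement is the Claim_ definition above) =====
theorem base_128_varint_encode_spec : Claim_equal_base_128_varint_encode := by
  intro istr _ hpre
  unfold Spec_base_128_varint_encode base_128_varint_encode base_128_varint_encode_alt
  unfold Pre_base_128_varint_encode at hpre
  obtain ⟨i, hi⟩ := Option.isSome_iff_exists.mp hpre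
  rw [hi]
  dsimp only
  have hbits : (intToBin32 i).toList
      = binFixed (max (pyBitLength ((PySem.Int.mod i (2 ^ 32)).toNat)) 1)
          ((PySem.Int.mod i (2 ^ 32)).toNat) := by
    rw [intToBin32, ← binDigits_eq]
    exact Eq.symm ((fun {l} {s} => String.ofList_eq.mp) rfl)
  rw [hbits,
    loopA_eq _ _ [] (le_max_right _ _) (v_lt_pow ((PySem.Int.mod i (2 ^ 32)).toNat))]
  rw [List.nil_append, List.map_reverse]
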